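-- pv_equiv track=rewrite | github.com/NoisNette/Codesignal-solutions | lookAndSaySequenceNextElement.py | lookAndSaySequenceNextElement
-- ===== SOURCE A (Python) =====
-- def lookAndSaySequenceNextElement(element):
--     element += ' '
--     pre = ' '
--     count = 0
--     res = ""
--     for ch in element:
--         if ch == pre:
--             count += 1
--         else:
--             if count != 0:
--                 res += str(count) + pre
--             pre = ch
--             count = 1
--     return res
-- ===== SOURCE B (Python) =====
-- def lookAndSaySequenceNextElement(element):
--     res = []
--     i = 0
--     n = len(element)
--     while i < n:
--         j = i
--         while j < n and element[j] == element[i]: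
--             j += 1
--         res.append(str(j - i) + element[i])
--         i = j
--     return ''.join(res)
-- ===== Notes on version B (the rewrite author's own statement) =====
-- stated objective: alternative
-- what changed: Replaced A's per-character state machine (pre/count state plus a trailing-space sentinel that flushes on change) by a two-pointer scan that jumps run by run and joins one string per run, which also removes the sentinel artifact.
-- intended difference: On nonempty inputs ending with a space, A's sentinel merges the trailing space run with the appended sentinel and never flushes it, so A silently drops that run, while B returns the full run-length encoding including the trailing space run, which is the intended value. — e.g. on lookAndSaySequenceNextElement(" "): A returns "", B returns "1 "
import Mathlib
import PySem

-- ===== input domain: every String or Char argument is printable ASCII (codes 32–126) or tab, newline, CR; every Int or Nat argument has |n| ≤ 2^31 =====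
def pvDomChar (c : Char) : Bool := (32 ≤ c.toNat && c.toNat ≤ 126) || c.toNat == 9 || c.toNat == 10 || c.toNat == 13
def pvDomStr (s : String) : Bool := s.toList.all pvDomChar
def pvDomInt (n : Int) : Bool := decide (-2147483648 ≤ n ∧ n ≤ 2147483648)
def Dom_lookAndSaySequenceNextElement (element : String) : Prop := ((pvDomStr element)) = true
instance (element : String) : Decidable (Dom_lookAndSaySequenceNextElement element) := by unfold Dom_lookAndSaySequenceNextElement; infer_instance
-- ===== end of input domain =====

-- B replaces A's per-character pre/count state machine with sentinel by a two-pointer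
-- run-by-run scan (objective: alternative); on inputs ending with ' ' B keeps the
-- trailing run that A's sentinel drops (see D_ below).

-- ===== PORT A =====
-- A's loop over `element + ' '` with state (pre, count, res); the growing Python string
-- res is ported as List Char, wrapped into String at the end.
def pvStepA (st : Char × Int × List Char) (ch : Char) : Char × Int × List Char :=
  let pre := st.1
  let count := st.2.1
  let res := st.2.2
  if ch == pre then (pre, count + 1, res)
  else
    let res' := if count ≠ 0 then res ++ PySem.Int.toChars count ++ [pre] else res
    (ch, 1, res')

def lookAndSaySequenceNextElement (element : String) : String :=
  String.ofList (((element.toList ++ [' ']).foldl pvStepA (' ', 0, [])).2.2)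

-- ===== PORT B =====
-- inner while loop (`while j < n and element[j] == element[i]`): length of the leading
-- run of c beyond its first char, and the remaining suffix
def pvTakeRun (c : Char) : List Char → Nat × List Char
  | [] => (0, [])
  | d :: ds =>
    if d == c then
      let r := pvTakeRun c ds
      (r.1 + 1, r.2)
    else (0, d :: ds)

-- outer while loop (`while i < n`), fuel-bounded only to make the recursion structural:
-- the fuel cs.length always suffices (pvRunsGo_adequate below)
def pvRunsGo : Nat → List Char → List (Char × Nat)
  | 0, _ => []
  | _, [] => []
  | fuel + 1, c :: cs =>
    let r := pvTakeRun c cs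
    (c, r.1 + 1) :: pvRunsGo fuel r.2

def pvRuns (cs : List Char) : List (Char × Nat) := pvRunsGo cs.length cs

-- str(j - i) + element[i] for one run, then ''.join over the runs
def pvEmitRun (r : Char × Nat) : List Char := PySem.Int.toChars (r.2 : Int) ++ [r.1]

def lookAndSaySequenceNextElement_alt (element : String) : String :=
  String.ofList (((pvRuns element.toList).map pvEmitRun).flatten)

-- ===== PRECONDITION & SPEC =====
-- On nonempty inputs ending with a space, A's sentinel merges the trailing space run with
-- the appended sentinel and never flushes it, so A silently drops that run, while B returns
-- the full run-length encoding including the trailing space run, the intended value.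
def D_lookAndSaySequenceNextElement (element : String) : Prop :=
  element.toList.getLast? = some ' '
instance (element : String) : Decidable (D_lookAndSaySequenceNextElement element) := by
  unfold D_lookAndSaySequenceNextElement; infer_instance

def Spec_lookAndSaySequenceNextElement (element : String) (out : String) : Prop :=
  ¬ D_lookAndSaySequenceNextElement element → out = lookAndSaySequenceNextElement_alt element
instance (element : String) (out : String) : Decidable (Spec_lookAndSaySequenceNextElement element out) := by
  unfold Spec_lookAndSaySequenceNextElement; infer_instance

def pvDiffWitness_lookAndSaySequenceNextElement : String := " "
def pvDiffWitnessOut_lookAndSaySequenceNextElement : String × String := ("", "1 ")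

-- ===== CLAIM (what is proved, stated in full; the proofs are below) =====
def Claim_unchanged_lookAndSaySequenceNextElement : Prop := ∀ (element : String), Dom_lookAndSaySequenceNextElement element → Spec_lookAndSaySequenceNextElement element (lookAndSaySequenceNextElement element)
def Claim_changed_lookAndSaySequenceNextElement : Prop := Dom_lookAndSaySequenceNextElement (pvDiffWitness_lookAndSaySequenceNextElement) ∧ D_lookAndSaySequenceNextElement (pvDiffWitness_lookAndSaySequenceNextElement) ∧ lookAndSaySequenceNextElement (pvDiffWitness_lookAndSaySequenceNextElement) = pvDiffWitnessOut_lookAndSaySequenceNextElement.1 ∧ lookAndSaySequenceNextElement_alt (pvDiffWitness_lookAndSaySequenceNextElement) = pvDiffWitnessOut_lookAndSaySequenceNextElement.2 ∧ pvDiffWitnessOut_lookAndSaySequenceNextElement.1 ≠ pvDiffWitnessOut_lookAndSaySequenceNextElement.2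
def Claim_exact_lookAndSaySequenceNextElement : Prop := ∀ (element : String), Dom_lookAndSaySequenceNextElement element → D_lookAndSaySequenceNextElement element → lookAndSaySequenceNextElement element ≠ lookAndSaySequenceNextElement_alt element

-- ===== LEMMAS AND PROOFS =====

theorem pvTakeRun_length_le (c : Char) (cs : List Char) : (pvTakeRun c cs).2.length ≤ cs.length := by
  induction cs with
  | nil => simp [pvTakeRun]
  | cons d ds ih =>
    by_cases h : d == c
    · simp [pvTakeRun, h]
      omega
    · simp [pvTakeRun, h]

theorem pvRunsGo_nil (fuel : Nat) : pvRunsGo fuel [] = [] := by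
  cases fuel
  · rfl
  · rfl

theorem pvRunsGo_succ_cons (fuel : Nat) (c : Char) (cs : List Char) :
    pvRunsGo (fuel + 1) (c :: cs) = (c, (pvTakeRun c cs).1 + 1) :: pvRunsGo fuel (pvTakeRun c cs).2 := rfl

theorem pvRunsGo_adequate (fuel : Nat) : ∀ (fuel' : Nat) (cs : List Char),
    cs.length ≤ fuel → cs.length ≤ fuel' → pvRunsGo fuel cs = pvRunsGo fuel' cs := by
  induction fuel with
  | zero =>
    intro fuel' cs h _
    have : cs = [] := List.eq_nil_of_length_eq_zero (by omega)
    subst this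
    rw [pvRunsGo_nil, pvRunsGo_nil]
  | succ fuel ih =>
    intro fuel' cs h h'
    cases cs with
    | nil => rw [pvRunsGo_nil, pvRunsGo_nil]
    | cons c cs' =>
      cases fuel' with
      | zero => simp at h'
      | succ f' =>
        rw [pvRunsGo_succ_cons, pvRunsGo_succ_cons]
        have hlen := pvTakeRun_length_le c cs'
        have hl : (c :: cs').length = cs'.length + 1 := rfl
        rw [hl] at h h'
        rw [ih f' (pvTakeRun c cs').2 (by omega) (by omega)]

theorem pvRuns_nil : pvRuns [] = [] := rfl

theorem pvRuns_cons (c : Char) (cs : List Char) :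
    pvRuns (c :: cs) = (c, (pvTakeRun c cs).1 + 1) :: pvRuns (pvTakeRun c cs).2 := by
  unfold pvRuns
  have hl : (c :: cs).length = cs.length + 1 := rfl
  rw [hl, pvRunsGo_succ_cons]
  have hlen := pvTakeRun_length_le c cs
  rw [pvRunsGo_adequate cs.length (pvTakeRun c cs).2.length (pvTakeRun c cs).2 hlen le_rfl]

-- drop the final run if it is a space run (what A's sentinel effectively does)
def pvDropTrail : List (Char × Nat) → List (Char × Nat)
  | [] => []
  | [r] => if r.1 = ' ' then [] else [r]
  | r :: s :: rs => r :: pvDropTrail (s :: rs)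

theorem pvDropTrail_cons {rs : List (Char × Nat)} (r : Char × Nat) (h : rs ≠ []) :
    pvDropTrail (r :: rs) = r :: pvDropTrail rs := by
  cases rs with
  | nil => exact absurd rfl h
  | cons s rs' => rw [pvDropTrail]

def pvEmit (rs : List (Char × Nat)) : List Char := (rs.map pvEmitRun).flatten

-- pvRuns with a pending open run (c, k) prepended, merging with the first run if same char
def pvRunsWith (c : Char) (k : Nat) (cs : List Char) : List (Char × Nat) :=
  match pvRuns cs with
  | (d, n) :: rest => if c = d then (c, k + n) :: rest else (c, k) :: (d, n) :: rest
  | [] => [(c, k)]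

theorem pvRunsWith_of_runs_nil {cs : List Char} (c : Char) (k : Nat) (h : pvRuns cs = []) :
    pvRunsWith c k cs = [(c, k)] := by
  unfold pvRunsWith; rw [h]

theorem pvRunsWith_of_runs_eq {cs : List Char} {n : Nat} {rest : List (Char × Nat)}
    (c : Char) (k : Nat) (h : pvRuns cs = (c, n) :: rest) :
    pvRunsWith c k cs = (c, k + n) :: rest := by
  unfold pvRunsWith; rw [h]; simp

theorem pvRunsWith_of_runs_ne {cs : List Char} {d : Char} {n : Nat} {rest : List (Char × Nat)}
    (c : Char) (k : Nat) (h : pvRuns cs = (d, n) :: rest) (hne : c ≠ d) :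
    pvRunsWith c k cs = (c, k) :: (d, n) :: rest := by
  unfold pvRunsWith; rw [h]; simp [hne]

theorem pvRunsWith_ne_nil (c : Char) (k : Nat) (cs : List Char) : pvRunsWith c k cs ≠ [] := by
  unfold pvRunsWith
  cases hr : pvRuns cs with
  | nil => simp
  | cons r rest =>
    obtain ⟨d, n⟩ := r
    by_cases h : c = d <;> simp [h]

theorem pvTakeRun_self (c : Char) (ds : List Char) :
    pvTakeRun c (c :: ds) = ((pvTakeRun c ds).1 + 1, (pvTakeRun c ds).2) := by
  simp [pvTakeRun]

theorem pvTakeRun_ne {c d : Char} (h : d ≠ c) (ds : List Char) :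
    pvTakeRun c (d :: ds) = (0, d :: ds) := by
  have hb : (d == c) = false := beq_eq_false_iff_ne.mpr h
  simp [pvTakeRun, hb]

theorem pvRunsWith_cons (c : Char) (k : Nat) (cs : List Char) :
    pvRunsWith c k (c :: cs) = pvRunsWith c (k + 1) cs := by
  rw [pvRunsWith_of_runs_eq c k (pvRuns_cons c cs)]
  cases cs with
  | nil =>
    rw [pvRunsWith_of_runs_nil c (k+1) pvRuns_nil]
    simp [pvTakeRun, pvRuns_nil]
  | cons d ds =>
    by_cases h : d = c
    · subst h
      rw [pvRunsWith_of_runs_eq d (k+1) (pvRuns_cons d ds), pvTakeRun_self]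
      simp only [List.cons.injEq, Prod.mk.injEq, true_and, and_true]
      omega
    · rw [pvTakeRun_ne h ds]
      rw [pvRunsWith_of_runs_ne c (k+1) (pvRuns_cons d ds) (fun e => h e.symm)]
      rw [pvRuns_cons]

theorem pvRunsWith_one (c : Char) (cs : List Char) :
    pvRunsWith c 1 cs = pvRuns (c :: cs) := by
  rw [pvRuns_cons]
  cases cs with
  | nil =>
    rw [pvRunsWith_of_runs_nil c 1 pvRuns_nil]
    simp [pvTakeRun, pvRuns_nil]
  | cons d ds =>
    by_cases h : d = c
    · subst h
      rw [pvRunsWith_of_runs_eq d 1 (pvRuns_cons d ds), pvTakeRun_self]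
      simp only [List.cons.injEq, Prod.mk.injEq, true_and, and_true]
      omega
    · rw [pvTakeRun_ne h ds]
      rw [pvRunsWith_of_runs_ne c 1 (pvRuns_cons d ds) (fun e => h e.symm)]
      rw [pvRuns_cons]

theorem pvRunsWith_cons_ne {c d : Char} (h : c ≠ d) (k : Nat) (cs : List Char) :
    pvRunsWith d k (c :: cs) = (d, k) :: pvRunsWith c 1 cs := by
  rw [pvRunsWith_of_runs_ne d k (pvRuns_cons c cs) (Ne.symm h), pvRunsWith_one, pvRuns_cons]

theorem pvToCharsSucc (k : Nat) : PySem.Int.toChars ((k : Int) + 1) = PySem.Int.toChars (((k + 1 : Nat)) : Int) := by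
  push_cast; ring_nf

-- the main loop invariant for A's fold, with an open run (pre, k+1)
theorem pvInv (cs : List Char) : ∀ (pre : Char) (k : Nat) (res : List Char),
    ((cs ++ [' ']).foldl pvStepA (pre, ((k : Int) + 1), res)).2.2
      = res ++ pvEmit (pvDropTrail (pvRunsWith pre (k + 1) cs)) := by
  induction cs with
  | nil =>
    intro pre k res
    rw [pvRunsWith_of_runs_nil pre (k+1) pvRuns_nil]
    by_cases h : pre = ' '
    · subst h
      simp [pvStepA, pvDropTrail, pvEmit]
    · have hne : (' ' == pre) = false := beq_eq_false_iff_ne.mpr (fun e => h e.symm)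
      have hk : ((k : Int) + 1) ≠ 0 := by omega
      have hstep : pvStepA (pre, (k : Int) + 1, res) ' '
          = (' ', 1, res ++ PySem.Int.toChars ((k : Int) + 1) ++ [pre]) := by
        simp [pvStepA, hne, hk]
      simp only [List.nil_append, List.foldl_cons, List.foldl_nil, hstep]
      simp [pvDropTrail, h, pvEmit, pvEmitRun, pvToCharsSucc]
  | cons c cs' ih =>
    intro pre k res
    by_cases h : c = pre
    · subst h
      have hstep : pvStepA (c, (k : Int) + 1, res) c = (c, ((k + 1 : Nat) : Int) + 1, res) := by
        simp [pvStepA]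
        try push_cast
        try ring
      simp only [List.cons_append, List.foldl_cons, hstep]
      rw [ih c (k + 1) res, pvRunsWith_cons]
    · have hne : (c == pre) = false := beq_eq_false_iff_ne.mpr h
      have hk : ((k : Int) + 1) ≠ 0 := by omega
      have hstep : pvStepA (pre, (k : Int) + 1, res) c
          = (c, ((0 : Nat) : Int) + 1, res ++ PySem.Int.toChars ((k : Int) + 1) ++ [pre]) := by
        simp [pvStepA, hne, hk]
      simp only [List.cons_append, List.foldl_cons, hstep]
      rw [ih c 0 (res ++ PySem.Int.toChars ((k : Int) + 1) ++ [pre])]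
      have h01 : (0 : Nat) + 1 = 1 := rfl
      rw [h01]
      rw [pvRunsWith_cons_ne h (k + 1) cs']
      rw [pvDropTrail_cons _ (pvRunsWith_ne_nil c 1 cs')]
      simp [pvEmit, pvEmitRun, pvToCharsSucc, List.append_assoc]

-- A computes emit (dropTrail (runs …)) on any nonempty input
theorem pvA_eq (element : String) (c : Char) (cs' : List Char) (h : element.toList = c :: cs') :
    lookAndSaySequenceNextElement element
      = String.ofList (pvEmit (pvDropTrail (pvRuns (c :: cs')))) := by
  unfold lookAndSaySequenceNextElement
  rw [h]
  have hstep : pvStepA (' ', 0, []) c = (c, ((0 : Nat) : Int) + 1, []) := by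
    by_cases hc : c = ' '
    · subst hc; simp [pvStepA]
    · have hne : (c == ' ') = false := beq_eq_false_iff_ne.mpr hc
      simp [pvStepA, hne]
  simp only [List.cons_append, List.foldl_cons, hstep]
  rw [pvInv cs' c 0 [], pvRunsWith_one]
  simp

theorem pvTakeRun_eq (c : Char) (cs : List Char) :
    cs = List.replicate (pvTakeRun c cs).1 c ++ (pvTakeRun c cs).2 := by
  induction cs with
  | nil => simp [pvTakeRun]
  | cons d ds ih =>
    by_cases h : d = c
    · subst h
      rw [pvTakeRun_self]
      simp only [List.replicate_succ, List.cons_append]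
      exact congrArg (d :: ·) ih
    · rw [pvTakeRun_ne h ds]
      simp

theorem pvRunsGo_nil_iff (fuel : Nat) (cs : List Char) (h : cs.length ≤ fuel) :
    pvRunsGo fuel cs = [] ↔ cs = [] := by
  cases cs with
  | nil => simp [pvRunsGo_nil]
  | cons c cs' =>
    cases fuel with
    | zero => simp at h
    | succ f => rw [pvRunsGo_succ_cons]; simp

-- the char of the last run is the last char of the input
theorem pvRunsGo_getLast (fuel : Nat) : ∀ (cs : List Char) (r : Char × Nat),
    cs.length ≤ fuel → (pvRunsGo fuel cs).getLast? = some r → cs.getLast? = some r.1 := by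
  induction fuel with
  | zero =>
    intro cs r h hr
    have : cs = [] := List.eq_nil_of_length_eq_zero (by omega)
    subst this
    rw [pvRunsGo_nil] at hr
    exact absurd hr (by simp)
  | succ fuel ih =>
    intro cs r h hr
    cases cs with
    | nil => rw [pvRunsGo_nil] at hr; exact absurd hr (by simp)
    | cons c cs' =>
      rw [pvRunsGo_succ_cons] at hr
      have hl : (c :: cs').length = cs'.length + 1 := rfl
      rw [hl] at h
      have hlen := pvTakeRun_length_le c cs'
      have hsplit := pvTakeRun_eq c cs'
      cases hrest : pvRunsGo fuel (pvTakeRun c cs').2 with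
      | nil =>
        rw [hrest] at hr
        simp only [List.getLast?_singleton, Option.some.injEq] at hr
        have hnil : (pvTakeRun c cs').2 = [] :=
          (pvRunsGo_nil_iff fuel (pvTakeRun c cs').2 (by omega)).mp hrest
        rw [hnil, List.append_nil] at hsplit
        rw [← hr]
        rw [List.getLast?_cons, hsplit]
        cases hk : (pvTakeRun c cs').1 with
        | zero => simp
        | succ m => simp [List.replicate_succ']
      | cons s rest' =>
        rw [hrest, List.getLast?_cons_cons, ← hrest] at hr
        have hne2 : (pvTakeRun c cs').2 ≠ [] := by
          intro hnil
          rw [hnil, pvRunsGo_nil] at hrest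
          exact absurd hrest (by simp)
        have h2 := ih (pvTakeRun c cs').2 r (by omega) hr
        rw [List.getLast?_cons, hsplit]
        rw [List.getLast?_append_of_ne_nil _ hne2, h2]
        simp

theorem pvRuns_getLast (cs : List Char) (r : Char × Nat)
    (hr : (pvRuns cs).getLast? = some r) : cs.getLast? = some r.1 :=
  pvRunsGo_getLast cs.length cs r le_rfl hr

theorem pvDropTrail_eq_self (rs : List (Char × Nat))
    (h : ∀ r, rs.getLast? = some r → r.1 ≠ ' ') : pvDropTrail rs = rs := by
  induction rs with
  | nil => rfl
  | cons r rs' ih =>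
    cases rs' with
    | nil =>
      have := h r (by simp)
      simp [pvDropTrail, this]
    | cons s rs'' =>
      rw [pvDropTrail]
      rw [ih (fun t ht => h t (by rw [List.getLast?_cons_cons]; exact ht))]

theorem pvDropTrail_concat_space (init : List (Char × Nat)) (n : Nat) :
    pvDropTrail (init ++ [(' ', n)]) = init := by
  induction init with
  | nil => simp [pvDropTrail]
  | cons r rs ih =>
    rw [List.cons_append, pvDropTrail_cons r (by simp), ih]

-- ===== VERDICT (by name: the statement is the Claim_ definition above) =====
theorem lookAndSaySequenceNextElement_spec : Claim_unchanged_lookAndSaySequenceNextElement := by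
  intro element _ hD
  cases hcs : element.toList with
  | nil =>
    unfold lookAndSaySequenceNextElement lookAndSaySequenceNextElement_alt
    rw [hcs]
    rfl
  | cons c cs' =>
    rw [pvA_eq element c cs' hcs]
    unfold lookAndSaySequenceNextElement_alt
    rw [hcs]
    rw [pvDropTrail_eq_self]
    · rfl
    · intro r hr hsp
      have hlast := pvRuns_getLast (c :: cs') r hr
      unfold D_lookAndSaySequenceNextElement at hD
      rw [hcs, hlast, hsp] at hD
      exact hD rfl

theorem lookAndSaySequenceNextElement_changed : Claim_changed_lookAndSaySequenceNextElement := by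
  unfold Claim_changed_lookAndSaySequenceNextElement; decide

theorem lookAndSaySequenceNextElement_tight : Claim_exact_lookAndSaySequenceNextElement := by
  intro element _ hD heq
  unfold D_lookAndSaySequenceNextElement at hD
  cases hcs : element.toList with
  | nil => rw [hcs] at hD; simp at hD
  | cons c cs' =>
    rw [pvA_eq element c cs' hcs] at heq
    unfold lookAndSaySequenceNextElement_alt at heq
    rw [hcs] at heq
    have hne : pvRuns (c :: cs') ≠ [] := by rw [pvRuns_cons]; exact List.cons_ne_nil _ _
    obtain ⟨r, hr⟩ : ∃ r, (pvRuns (c :: cs')).getLast? = some r :=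
      ⟨_, List.getLast?_eq_some_getLast hne⟩
    have hlast := pvRuns_getLast (c :: cs') r hr
    rw [hcs, hlast] at hD
    have hr1 : r.1 = ' ' := by injection hD
    have hgl : (pvRuns (c :: cs')).getLast hne = r := by
      rw [List.getLast?_eq_some_getLast hne] at hr
      exact Option.some.inj hr
    have hsplit : pvRuns (c :: cs') = (pvRuns (c :: cs')).dropLast ++ [r] := by
      conv_lhs => rw [← List.dropLast_append_getLast hne]
      rw [hgl]
    obtain ⟨rc, rn⟩ := r
    simp only at hr1
    subst hr1
    rw [hsplit, pvDropTrail_concat_space] at heq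
    have hlist := congrArg String.toList heq
    simp only [String.toList_ofList] at hlist
    have h2 : pvEmit ((pvRuns (c :: cs')).dropLast)
        = pvEmit ((pvRuns (c :: cs')).dropLast) ++ pvEmitRun (' ', rn) := by
      simpa [pvEmit] using hlist
    have h3 := congrArg List.length h2
    rw [List.length_append] at h3
    have h4 : (pvEmitRun (' ', rn)).length ≠ 0 := by simp [pvEmitRun]
    omega
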